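-- pv_equiv track=rewrite | github.com/arror403/leetcode_submission_detail | 4021-distinct-points-reachable-after-substring-removal/2025-09-30 13.48.04 - Accepted - runtime 479ms - memory 40.1MB.py | distinctPoints
-- ===== SOURCE A (Python) =====
-- def distinctPoints(s: str, k: int) -> int:
--     n = len(s)
--     d = {'U': (0, 1), 'D': (0, -1), 'L': (-1, 0), 'R': (1, 0)}
--
--     # Compute prefix sums
--     pre = [[0, 0]]
--     for c in s:
--         dx, dy = d[c]
--         pre.append([pre[-1][0] + dx, pre[-1][1] + dy])
--
--     # Instead of precomputing suffix, use the fact that: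
--     # suffix[i] = total - pre[i]
--     total_x, total_y = pre[n]
--
--     # Collect distinct points
--     seen = set()
--     for i in range(n - k + 1):
--         # Position = pre[i] + (total - pre[i+k])
--         x = pre[i][0] + total_x - pre[i + k][0]
--         y = pre[i][1] + total_y - pre[i + k][1]
--         seen.add((x, y))
--
--
--     return len(seen)
-- ===== SOURCE B (Python) =====
-- def distinctPoints(s: str, k: int) -> int:
--     # Sliding-window displacement: no prefix-sum array, O(1) extra space.
--     D = {'U': (0, 1), 'D': (0, -1), 'L': (-1, 0), 'R': (1, 0)}
--     n = len(s)
--     tx = ty = 0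
--     for c in s:
--         dx, dy = D[c]
--         tx += dx
--         ty += dy
--     wx = wy = 0
--     for c in s[:k]:
--         dx, dy = D[c]
--         wx += dx
--         wy += dy
--     seen = set()
--     for i in range(n - k + 1):
--         seen.add((tx - wx, ty - wy))
--         if i + k < n:
--             ox, oy = D[s[i]]
--             ax, ay = D[s[i + k]]
--             wx += ax - ox
--             wy += ay - oy
--     return len(seen)
-- ===== Notes on version B (the rewrite author's own statement) =====
-- stated objective: alternative
-- what changed: Replaces the O(n) prefix-sum array with an incrementally maintained sliding-window displacement (total minus window gives each endpoint), using O(1) extra space besides the result set.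
import Mathlib
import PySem

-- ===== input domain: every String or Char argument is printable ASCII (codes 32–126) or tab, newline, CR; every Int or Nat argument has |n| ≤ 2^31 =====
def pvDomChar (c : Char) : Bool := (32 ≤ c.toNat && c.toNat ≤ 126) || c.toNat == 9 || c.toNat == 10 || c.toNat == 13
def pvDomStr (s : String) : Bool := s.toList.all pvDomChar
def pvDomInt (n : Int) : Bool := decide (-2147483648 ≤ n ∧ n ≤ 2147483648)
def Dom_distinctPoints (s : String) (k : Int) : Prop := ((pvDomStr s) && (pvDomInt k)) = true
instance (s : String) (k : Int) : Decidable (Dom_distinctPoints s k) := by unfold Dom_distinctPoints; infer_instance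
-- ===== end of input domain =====

-- ===== PORT A =====
-- B changes the mechanism: no prefix-sum array, only a sliding window displacement.
-- Move table, shared literal of both Pythons: {'U':(0,1),'D':(0,-1),'L':(-1,0),'R':(1,0)}
def pvMoves : PySem.Dict Char (Int × Int) :=
  PySem.Dict.ofList [('U', (0, 1)), ('D', (0, -1)), ('L', (-1, 0)), ('R', (1, 0))]

-- port of A: prefix-sum list `pre`, then one pass collecting pre[i] + total - pre[i+k]
def distinctPoints (s : String) (k : Int) : Int :=
  let n : Int := PySem.Str.len s
  let pre : List (Int × Int) := s.toList.foldl
    (fun pre c =>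
      let d := pvMoves.getD c (0, 0)
      let last := PySem.List.pyGetD pre (-1) (0, 0)
      pre ++ [(last.1 + d.1, last.2 + d.2)]) [(0, 0)]
  let total := PySem.List.pyGetD pre n (0, 0)
  let seen : PySem.Set (Int × Int) := (PySem.List.pyRange 0 (n - k + 1) 1).foldl
    (fun seen i =>
      let pi := PySem.List.pyGetD pre i (0, 0)
      let pik := PySem.List.pyGetD pre (i + k) (0, 0)
      PySem.Set.add seen (pi.1 + total.1 - pik.1, pi.2 + total.2 - pik.2))
    PySem.Set.empty
  (seen.length : Int)

-- ===== PORT B =====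
-- port of B: total displacement + initial window s[:k], then slide the window
def distinctPoints_alt (s : String) (k : Int) : Int :=
  let n : Int := PySem.Str.len s
  let t : Int × Int := s.toList.foldl
    (fun t c => let d := pvMoves.getD c (0, 0); (t.1 + d.1, t.2 + d.2)) (0, 0)
  let w0 : Int × Int := (PySem.List.slice s.toList none (some k)).foldl
    (fun w c => let d := pvMoves.getD c (0, 0); (w.1 + d.1, w.2 + d.2)) (0, 0)
  let res : (Int × Int) × PySem.Set (Int × Int) :=
    (PySem.List.pyRange 0 (n - k + 1) 1).foldl
      (fun st i =>
        let w := st.1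
        let seen := PySem.Set.add st.2 (t.1 - w.1, t.2 - w.2)
        if i + k < n then
          let o := pvMoves.getD (PySem.List.pyGetD s.toList i ' ') (0, 0)
          let a := pvMoves.getD (PySem.List.pyGetD s.toList (i + k) ' ') (0, 0)
          ((w.1 + (a.1 - o.1), w.2 + (a.2 - o.2)), seen)
        else (w, seen))
      (w0, PySem.Set.empty)
  (res.2.length : Int)

-- ===== PRECONDITION & SPEC =====
-- Pre_ excludes inputs where the Python A raises: a KeyError on any character outside
-- 'UDLR', and an IndexError (pre[i] past the end) whenever k < 0.
def Pre_distinctPoints (s : String) (k : Int) : Prop :=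
  s.toList.all (fun c => c == 'U' || c == 'D' || c == 'L' || c == 'R') = true ∧ 0 ≤ k
instance (s : String) (k : Int) : Decidable (Pre_distinctPoints s k) := by
  unfold Pre_distinctPoints; infer_instance

def pvWitness_distinctPoints : String × Int := ("UD", 1)

def Spec_distinctPoints (s : String) (k : Int) (out : Int) : Prop := out = distinctPoints_alt s k
instance (s : String) (k : Int) (out : Int) : Decidable (Spec_distinctPoints s k out) := by unfold Spec_distinctPoints; infer_instance

-- ===== CLAIM (what is proved, stated in full; the proofs are below) =====
def Claim_equal_distinctPoints : Prop := ∀ (s : String) (k : Int), Dom_distinctPoints s k → Pre_distinctPoints s k → Spec_distinctPoints s k (distinctPoints s k)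

-- ===== LEMMAS AND PROOFS =====

-- the move of one character, as both ports look it up
def pvDv (c : Char) : Int × Int := pvMoves.getD c (0, 0)

-- displacement of a character list (exactly B's total fold)
def pvPfx (l : List Char) : Int × Int :=
  l.foldl (fun t c => (t.1 + (pvDv c).1, t.2 + (pvDv c).2)) (0, 0)

-- window displacement of l[i:i+k]
def pvWin (l : List Char) (k i : Int) : Int × Int :=
  ((pvPfx (l.take (i + k).toNat)).1 - (pvPfx (l.take i.toNat)).1,
   (pvPfx (l.take (i + k).toNat)).2 - (pvPfx (l.take i.toNat)).2)

-- the point both programs record at start index i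
def pvPt (l : List Char) (k i : Int) : Int × Int :=
  ((pvPfx l).1 - (pvWin l k i).1, (pvPfx l).2 - (pvWin l k i).2)

-- common specification of both result sets
def pvSeen (l : List Char) (k : Int) : PySem.Set (Int × Int) :=
  (PySem.List.pyRange 0 ((l.length : Int) - k + 1) 1).foldl
    (fun seen i => PySem.Set.add seen (pvPt l k i)) PySem.Set.empty

theorem pvPfx_append_singleton (l : List Char) (c : Char) :
    pvPfx (l ++ [c]) = ((pvPfx l).1 + (pvDv c).1, (pvPfx l).2 + (pvDv c).2) := by
  simp [pvPfx, List.foldl_append]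

theorem pvPfx_take_succ (l : List Char) (m : Nat) (hm : m < l.length) :
    pvPfx (l.take (m + 1)) = ((pvPfx (l.take m)).1 + (pvDv l[m]).1,
                              (pvPfx (l.take m)).2 + (pvDv l[m]).2) := by
  rw [List.take_succ_eq_append_getElem hm, pvPfx_append_singleton]

-- A's prefix list is the table of pvPfx over all prefixes
theorem pvPreA (l : List Char) :
    l.foldl (fun pre c =>
        let d := pvMoves.getD c (0, 0)
        let last := PySem.List.pyGetD pre (-1) (0, 0)
        pre ++ [(last.1 + d.1, last.2 + d.2)]) [(0, 0)]
      = (List.range (l.length + 1)).map (fun j => pvPfx (l.take j)) := by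
  induction l using List.reverseRecOn with
  | nil => simp [pvPfx]
  | append_singleton l c ih =>
    rw [List.foldl_append, ih]
    simp only [List.foldl_cons, List.foldl_nil]
    rw [List.range_succ, List.map_append]
    simp only [List.map_cons, List.map_nil, PySem.List.pyGetD_neg_one_append_singleton]
    simp only [List.length_append, List.length_cons, List.length_nil]
    rw [List.range_succ, List.map_append]
    simp only [List.map_cons, List.map_nil]
    congr 1
    · rw [List.range_succ, List.map_append]
      simp only [List.map_cons, List.map_nil]
      congr 1
      · apply List.map_congr_left
        intro j hj
        rw [List.mem_range] at hj
        rw [List.take_append_of_le_length (by omega)]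
      · rw [List.take_append_of_le_length (le_refl _), List.take_length]
    · rw [show List.take (l.length + 1) (l ++ [c]) = l ++ [c] from
            List.take_of_length_le (by simp), pvPfx_append_singleton]
      simp [pvDv]

-- B's loop with window invariant computes the spec fold (seen component)
theorem pvLoopB (l : List Char) (k : Int) (hk : 0 ≤ k) (a : Int) (ha : 0 ≤ a)
    (seen : PySem.Set (Int × Int)) :
    ((PySem.List.pyRange a ((l.length : Int) - k + 1) 1).foldl
      (fun st i =>
        let w := st.1
        let seen := PySem.Set.add st.2 ((pvPfx l).1 - w.1, (pvPfx l).2 - w.2)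
        if i + k < (l.length : Int) then
          let o := pvMoves.getD (PySem.List.pyGetD l i ' ') (0, 0)
          let b := pvMoves.getD (PySem.List.pyGetD l (i + k) ' ') (0, 0)
          ((w.1 + (b.1 - o.1), w.2 + (b.2 - o.2)), seen)
        else (w, seen))
      (pvWin l k a, seen)).2
    = (PySem.List.pyRange a ((l.length : Int) - k + 1) 1).foldl
        (fun seen i => PySem.Set.add seen (pvPt l k i)) seen := by
  induction hn : ((l.length : Int) - k + 1 - a).toNat generalizing a seen with
  | zero =>
    rw [PySem.List.pyRange_one_eq_nil (by omega), List.foldl_nil, List.foldl_nil]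
  | succ n ih =>
    have hlt : a < (l.length : Int) - k + 1 := by omega
    rw [PySem.List.pyRange_one_cons hlt, List.foldl_cons, List.foldl_cons]
    simp only
    have hpt : ((pvPfx l).1 - (pvWin l k a).1, (pvPfx l).2 - (pvWin l k a).2)
        = pvPt l k a := rfl
    rw [hpt]
    by_cases hik : a + k < (l.length : Int)
    · rw [if_pos hik]
      have hwa : a.toNat < l.length := by omega
      have hwak : (a + k).toNat < l.length := by omega
      have hga : PySem.List.pyGetD l a ' ' = l[a.toNat] :=
        PySem.List.pyGetD_eq_getElem l ' ' ha (by omega)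
      have hgak : PySem.List.pyGetD l (a + k) ' ' = l[(a + k).toNat] :=
        PySem.List.pyGetD_eq_getElem l ' ' (by omega) (by omega)
      have hwin : ((pvWin l k a).1 + ((pvMoves.getD l[(a + k).toNat] (0, 0)).1
              - (pvMoves.getD l[a.toNat] (0, 0)).1),
            (pvWin l k a).2 + ((pvMoves.getD l[(a + k).toNat] (0, 0)).2
              - (pvMoves.getD l[a.toNat] (0, 0)).2))
          = pvWin l k (a + 1) := by
        have h1 : (a + 1 + k).toNat = (a + k).toNat + 1 := by omega
        have h2 : (a + 1).toNat = a.toNat + 1 := by omega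
        simp only [pvWin, h1, h2, pvPfx_take_succ l _ hwak, pvPfx_take_succ l _ hwa, pvDv,
          Prod.mk.injEq]
        constructor <;> ring
      rw [hga, hgak, hwin, ih (a + 1) (by omega) _ (by omega)]
    · rw [if_neg hik]
      have hnil : PySem.List.pyRange (a + 1) ((l.length : Int) - k + 1) 1 = [] :=
        PySem.List.pyRange_one_eq_nil (by omega)
      rw [hnil, List.foldl_nil, List.foldl_nil]

theorem pvTotal (l : List Char) :
    PySem.List.pyGetD ((List.range (l.length + 1)).map (fun j => pvPfx (l.take j)))
      (l.length : Int) (0, 0) = pvPfx l := by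
  rw [PySem.List.pyGetD_eq_getElem _ _ (by omega) (by simp)]
  simp

theorem pvA_eq (s : String) (k : Int) (hk : 0 ≤ k) :
    distinctPoints s k = ((pvSeen s.toList k).length : Int) := by
  unfold distinctPoints
  simp only [PySem.Str.len_eq, pvPreA, pvTotal]
  congr 1
  unfold pvSeen
  congr 1
  apply PySem.List.foldl_congr_mem
  intro acc i hi
  rw [PySem.List.mem_pyRange_one] at hi
  obtain ⟨h0, h1⟩ := hi
  have hls : s.toList.length = s.length := by simp
  have hi1 : PySem.List.pyGetD ((List.range (s.toList.length + 1)).map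
      (fun j => pvPfx (s.toList.take j))) i (0, 0) = pvPfx (s.toList.take i.toNat) := by
    rw [PySem.List.pyGetD_eq_getElem _ _ h0 (by simp; omega)]
    simp
  have hi2 : PySem.List.pyGetD ((List.range (s.toList.length + 1)).map
      (fun j => pvPfx (s.toList.take j))) (i + k) (0, 0)
      = pvPfx (s.toList.take (i + k).toNat) := by
    rw [PySem.List.pyGetD_eq_getElem _ _ (by omega) (by simp; omega)]
    simp
  rw [hi1, hi2]
  congr 1
  simp only [pvPt, pvWin, Prod.mk.injEq]
  constructor <;> ring

theorem pvB_eq (s : String) (k : Int) (hk : 0 ≤ k) :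
    distinctPoints_alt s k = ((pvSeen s.toList k).length : Int) := by
  unfold distinctPoints_alt
  simp only [PySem.Str.len_eq, PySem.List.slice_to _ hk]
  have h1 : s.toList.foldl
      (fun t c => let d := pvMoves.getD c (0, 0); (t.1 + d.1, t.2 + d.2)) ((0 : Int), (0 : Int))
      = pvPfx s.toList := by
    simp [pvPfx, pvDv]
  have h2 : (s.toList.take k.toNat).foldl
      (fun w c => let d := pvMoves.getD c (0, 0); (w.1 + d.1, w.2 + d.2)) ((0 : Int), (0 : Int))
      = pvWin s.toList k 0 := by
    simp [pvWin, pvPfx, pvDv]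
  rw [h1, h2, pvLoopB s.toList k hk 0 le_rfl]
  rfl

-- ===== VERDICT (by name: the statement is the Claim_ definition above) =====
theorem distinctPoints_spec : Claim_equal_distinctPoints := by
  intro s k _ hpre
  unfold Spec_distinctPoints
  rw [pvA_eq s k hpre.2, pvB_eq s k hpre.2]
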